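-- pv_equiv track=rewrite | github.com/billyhayes/discord_secret_room | utils/decode_permissions.py | format_permissions_by_category
-- ===== SOURCE A (Python) =====
-- CATEGORIES = {
--     "General": [
--         "administrator", "manage_server", "manage_roles", "manage_channels",
--         "kick_members", "ban_members", "timeout_members", "create_instant_invite",
--         "change_nickname", "manage_nicknames", "view_audit_log", "view_server_insights",
--         "manage_webhooks", "manage_events", "manage_emojis_and_stickers"
--     ],
--     "Text": [
--         "view_channels", "send_messages", "send_tts_messages", "manage_messages",
--         "embed_links", "attach_files", "read_message_history", "mention_everyone",
--         "use_external_emojis", "add_reactions", "use_slash_commands", "manage_threads",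
--         "create_public_threads", "create_private_threads", "send_messages_in_threads",
--         "use_external_stickers", "send_voice_messages"
--     ],
--     "Voice": [
--         "connect", "speak", "mute_members", "deafen_members", "move_members",
--         "use_voice_activity", "priority_speaker", "stream", "request_to_speak",
--         "use_soundboard", "use_external_sounds", "use_embedded_activities"
--     ],
--     "Special": [
--         "create_expressions"
--     ]
-- }
--
-- def format_permissions_by_category(permissions):
--     """Group permissions by category for better display"""
--     categorized = {}
--
--     for category, category_perms in CATEGORIES.items():
--         found_perms = [p for p in permissions if p in category_perms]
--         if found_perms:
--             categorized[category] = found_perms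
--
--     # Handle any permissions not in categories
--     all_categorized = []
--     for category_perms in CATEGORIES.values():
--         all_categorized.extend(category_perms)
--
--     uncategorized = [p for p in permissions if p not in all_categorized]
--     if uncategorized:
--         categorized["Other"] = uncategorized
--
--     return categorized
-- ===== SOURCE B (Python) =====
-- CATEGORIES = {
--     "General": [
--         "administrator", "manage_server", "manage_roles", "manage_channels",
--         "kick_members", "ban_members", "timeout_members", "create_instant_invite",
--         "change_nickname", "manage_nicknames", "view_audit_log", "view_server_insights",
--         "manage_webhooks", "manage_events", "manage_emojis_and_stickers"
--     ],
--     "Text": [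
--         "view_channels", "send_messages", "send_tts_messages", "manage_messages",
--         "embed_links", "attach_files", "read_message_history", "mention_everyone",
--         "use_external_emojis", "add_reactions", "use_slash_commands", "manage_threads",
--         "create_public_threads", "create_private_threads", "send_messages_in_threads",
--         "use_external_stickers", "send_voice_messages"
--     ],
--     "Voice": [
--         "connect", "speak", "mute_members", "deafen_members", "move_members",
--         "use_voice_activity", "priority_speaker", "stream", "request_to_speak",
--         "use_soundboard", "use_external_sounds", "use_embedded_activities"
--     ],
--     "Special": [
--         "create_expressions"
--     ]
-- }
--
--
-- def _category_of(p):
--     """First category whose permission list contains p, else 'Other'."""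
--     return next((c for c, ps in CATEGORIES.items() if p in ps), "Other")
--
--
-- def format_permissions_by_category(permissions):
--     """Group permissions by category: classify each once, then group by tag."""
--     tagged = [(_category_of(p), p) for p in permissions]
--     result = {}
--     for c in (*CATEGORIES, "Other"):
--         bucket = [p for t, p in tagged if t == c]
--         if bucket:
--             result[c] = bucket
--     return result
-- ===== Notes on version B (the rewrite author's own statement) =====
-- stated objective: simpler
-- what changed: A filters the permission list once per category and handles 'Other' by concatenating all category lists and re-scanning; B classifies each permission exactly once with a first-matching-category helper and then groups by that tag, treating 'Other' uniformly with the real categories.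
import Mathlib
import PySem

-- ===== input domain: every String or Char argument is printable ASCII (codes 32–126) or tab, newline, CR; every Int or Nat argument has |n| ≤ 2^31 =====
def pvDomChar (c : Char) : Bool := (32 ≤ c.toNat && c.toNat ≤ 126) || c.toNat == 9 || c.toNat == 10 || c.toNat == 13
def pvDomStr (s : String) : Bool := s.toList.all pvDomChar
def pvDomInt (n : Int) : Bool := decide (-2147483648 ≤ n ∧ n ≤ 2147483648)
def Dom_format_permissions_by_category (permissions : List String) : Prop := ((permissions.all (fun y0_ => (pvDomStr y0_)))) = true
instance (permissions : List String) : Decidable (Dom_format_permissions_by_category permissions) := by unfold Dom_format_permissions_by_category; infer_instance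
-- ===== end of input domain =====

-- B classifies each permission once (first matching category, else "Other") and groups by that tag,
-- instead of A's per-category filtering plus a concatenate-and-rescan pass for "Other"; objective: simpler.


-- ===== PORT A =====
def pvGeneral : List String :=
  ["administrator", "manage_server", "manage_roles", "manage_channels",
   "kick_members", "ban_members", "timeout_members", "create_instant_invite",
   "change_nickname", "manage_nicknames", "view_audit_log", "view_server_insights",
   "manage_webhooks", "manage_events", "manage_emojis_and_stickers"]
def pvText : List String :=
  ["view_channels", "send_messages", "send_tts_messages", "manage_messages",
   "embed_links", "attach_files", "read_message_history", "mention_everyone",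
   "use_external_emojis", "add_reactions", "use_slash_commands", "manage_threads",
   "create_public_threads", "create_private_threads", "send_messages_in_threads",
   "use_external_stickers", "send_voice_messages"]
def pvVoice : List String :=
  ["connect", "speak", "mute_members", "deafen_members", "move_members",
   "use_voice_activity", "priority_speaker", "stream", "request_to_speak",
   "use_soundboard", "use_external_sounds", "use_embedded_activities"]
def pvSpecial : List String := ["create_expressions"]
def pvCATEGORIES : List (String × List String) :=
  [("General", pvGeneral), ("Text", pvText), ("Voice", pvVoice), ("Special", pvSpecial)]

def format_permissions_by_category (permissions : List String) : List (String × List String) :=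
  let categorized :=
    pvCATEGORIES.foldl (fun d cp =>
      let found := permissions.filter (fun p => cp.2.contains p)
      if !found.isEmpty then d.insert cp.1 found else d) (PySem.Dict.empty)
  let allCategorized := pvCATEGORIES.foldl (fun acc cp => acc ++ cp.2) ([] : List String)
  let uncategorized := permissions.filter (fun p => !allCategorized.contains p)
  let categorized := if !uncategorized.isEmpty then categorized.insert "Other" uncategorized else categorized
  categorized.items

-- ===== PORT B =====
def pvCategoryOf (p : String) : String :=
  ((pvCATEGORIES.find? (fun cp => cp.2.contains p)).map Prod.fst).getD "Other"

def format_permissions_by_category_alt (permissions : List String) : List (String × List String) :=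
  let tagged := permissions.map (fun p => (pvCategoryOf p, p))
  let result :=
    (pvCATEGORIES.map Prod.fst ++ ["Other"]).foldl (fun d c =>
      let bucket := (tagged.filter (fun tp => tp.1 == c)).map Prod.snd
      if !bucket.isEmpty then d.insert c bucket else d) (PySem.Dict.empty)
  result.items

-- ===== PRECONDITION & SPEC =====
def Spec_format_permissions_by_category (permissions : List String) (out : List (String × List String)) : Prop := out = format_permissions_by_category_alt permissions
instance (permissions : List String) (out : List (String × List String)) : Decidable (Spec_format_permissions_by_category permissions out) := by unfold Spec_format_permissions_by_category; infer_instance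

-- ===== CLAIM (what is proved, stated in full; the proofs are below) =====
def Claim_equal_format_permissions_by_category : Prop := ∀ (permissions : List String), Dom_format_permissions_by_category permissions → Spec_format_permissions_by_category permissions (format_permissions_by_category permissions)

-- ===== LEMMAS AND PROOFS =====

lemma pv_contains_false_of_disj {l₁ l₂ : List String}
    (h : l₁.all (fun x => !l₂.contains x) = true) {p : String}
    (hp : l₁.contains p = true) : l₂.contains p = false := by
  have hm : p ∈ l₁ := by simpa using hp
  simpa using List.all_eq_true.mp h p hm

lemma pv_catOf_unfold (p : String) : pvCategoryOf p =
    (if pvGeneral.contains p then "General" else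
     if pvText.contains p then "Text" else
     if pvVoice.contains p then "Voice" else
     if pvSpecial.contains p then "Special" else "Other") := by
  unfold pvCategoryOf pvCATEGORIES
  by_cases hg : p ∈ pvGeneral <;> by_cases ht : p ∈ pvText <;>
    by_cases hv : p ∈ pvVoice <;> by_cases hs : p ∈ pvSpecial <;>
      simp [List.find?, hg, ht, hv, hs]

lemma pv_catGen (p : String) : pvGeneral.contains p = (pvCategoryOf p == "General") := by
  rw [pv_catOf_unfold]
  by_cases hg : p ∈ pvGeneral <;> by_cases ht : p ∈ pvText <;>
    by_cases hv : p ∈ pvVoice <;> by_cases hs : p ∈ pvSpecial <;> simp [hg, ht, hv, hs]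

lemma pv_catText (p : String) : pvText.contains p = (pvCategoryOf p == "Text") := by
  rw [pv_catOf_unfold]
  by_cases ht : p ∈ pvText
  · have hg : pvGeneral.contains p = false :=
      pv_contains_false_of_disj (l₁ := pvText) (by decide) (by simpa using ht)
    simp only [List.contains_eq_mem, decide_eq_false_iff_not] at hg
    simp [hg, ht]
  · by_cases hg : p ∈ pvGeneral <;> by_cases hv : p ∈ pvVoice <;>
      by_cases hs : p ∈ pvSpecial <;> simp [hg, ht, hv, hs]

lemma pv_catVoice (p : String) : pvVoice.contains p = (pvCategoryOf p == "Voice") := by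
  rw [pv_catOf_unfold]
  by_cases hv : p ∈ pvVoice
  · have hg : pvGeneral.contains p = false :=
      pv_contains_false_of_disj (l₁ := pvVoice) (by decide) (by simpa using hv)
    have ht : pvText.contains p = false :=
      pv_contains_false_of_disj (l₁ := pvVoice) (by decide) (by simpa using hv)
    simp only [List.contains_eq_mem, decide_eq_false_iff_not] at hg ht
    simp [hg, ht, hv]
  · by_cases hg : p ∈ pvGeneral <;> by_cases ht : p ∈ pvText <;>
      by_cases hs : p ∈ pvSpecial <;> simp [hg, ht, hv, hs]

lemma pv_catSpecial (p : String) : pvSpecial.contains p = (pvCategoryOf p == "Special") := by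
  rw [pv_catOf_unfold]
  by_cases hs : p ∈ pvSpecial
  · have hg : pvGeneral.contains p = false :=
      pv_contains_false_of_disj (l₁ := pvSpecial) (by decide) (by simpa using hs)
    have ht : pvText.contains p = false :=
      pv_contains_false_of_disj (l₁ := pvSpecial) (by decide) (by simpa using hs)
    have hv : pvVoice.contains p = false :=
      pv_contains_false_of_disj (l₁ := pvSpecial) (by decide) (by simpa using hs)
    simp only [List.contains_eq_mem, decide_eq_false_iff_not] at hg ht hv
    simp [hg, ht, hv, hs]
  · by_cases hg : p ∈ pvGeneral <;> by_cases ht : p ∈ pvText <;>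
      by_cases hv : p ∈ pvVoice <;> simp [hg, ht, hv, hs]

lemma pv_catOther (p : String) :
    (!(pvGeneral ++ (pvText ++ (pvVoice ++ pvSpecial))).contains p) = (pvCategoryOf p == "Other") := by
  rw [pv_catOf_unfold]
  by_cases hg : p ∈ pvGeneral <;> by_cases ht : p ∈ pvText <;>
    by_cases hv : p ∈ pvVoice <;> by_cases hs : p ∈ pvSpecial <;> simp [hg, ht, hv, hs]

lemma pv_tag_filter (l : List String) (c : String) :
    ((l.map (fun p => (pvCategoryOf p, p))).filter (fun tp => tp.1 == c)).map Prod.snd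
      = l.filter (fun p => pvCategoryOf p == c) := by
  induction l with
  | nil => rfl
  | cons x xs ih =>
    simp only [List.map_cons, List.filter_cons]
    cases h : pvCategoryOf x == c <;> simp [ih]

-- ===== VERDICT (by name: the statement is the Claim_ definition above) =====
theorem format_permissions_by_category_spec : Claim_equal_format_permissions_by_category := by
  intro perms _
  unfold Spec_format_permissions_by_category
  unfold format_permissions_by_category format_permissions_by_category_alt
  simp only [pvCATEGORIES, List.foldl_cons, List.foldl_nil, List.map_cons, List.map_nil,
    List.nil_append, List.append_assoc, List.cons_append]
  rw [pv_tag_filter, pv_tag_filter, pv_tag_filter, pv_tag_filter, pv_tag_filter]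
  rw [List.filter_congr (fun x _ => pv_catGen x), List.filter_congr (fun x _ => pv_catText x),
      List.filter_congr (fun x _ => pv_catVoice x), List.filter_congr (fun x _ => pv_catSpecial x),
      List.filter_congr (fun x _ => pv_catOther x)]
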